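-- pv_equiv track=rewrite | github.com/licslxd/D4C | code/executors/decode_controller.py | _unbalanced_delimiters
-- ===== SOURCE A (Python) =====
-- def _unbalanced_delimiters(text: str) -> bool:
--     """轻量括号/引号未闭合检测（字符级，供 forbid_eos）。"""
--     s = text or ""
--     p = 0
--     b = 0
--     quote = False
--     esc = False
--     for ch in s:
--         if esc:
--             esc = False
--             continue
--         if ch == "\\":
--             esc = True
--             continue
--         if ch == '"':
--             quote = not quote
--             continue
--         if quote:
--             continue
--         if ch == "(":
--             p += 1
--         elif ch == ")":
--             p = max(0, p - 1)
--         elif ch == "[":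
--             b += 1
--         elif ch == "]":
--             b = max(0, b - 1)
--     return quote or p > 0 or b > 0
-- ===== SOURCE B (Python) =====
-- def _unbalanced_delimiters(text: str) -> bool:
--     """Pipeline version: strip escape pairs, split on '"', count brackets outside quotes."""
--     s = text or ""
--     # pass 1: delete backslash-escape pairs (a trailing lone backslash is dropped; it is inert anyway)
--     out = []
--     i = 0
--     n = len(s)
--     while i < n:
--         if s[i] == "\\":
--             i += 2
--         else:
--             out.append(s[i])
--             i += 1
--     cleaned = "".join(out)
--     # pass 2: split on quotes; even-indexed parts are outside quotes
--     parts = cleaned.split('"')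
--     outside = "".join(parts[0::2])
--     # pass 3: floor-at-zero bracket counting on the outside text only
--     p = 0
--     b = 0
--     for ch in outside:
--         if ch == "(":
--             p += 1
--         elif ch == ")":
--             p = max(0, p - 1)
--         elif ch == "[":
--             b += 1
--         elif ch == "]":
--             b = max(0, b - 1)
--     return len(parts) % 2 == 0 or p > 0 or b > 0
-- ===== Notes on version B (the rewrite author's own statement) =====
-- stated objective: alternative
-- what changed: Replaces A's single stateful scan (esc/quote flags carried through one loop) by a three-stage pipeline: delete backslash-escape pairs, split the cleaned text on the quote character and keep only even-indexed segments (text outside quotes; quote unbalanced iff an even number of parts), then a plain floor-at-zero bracket counter over that outside text.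
import Mathlib
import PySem

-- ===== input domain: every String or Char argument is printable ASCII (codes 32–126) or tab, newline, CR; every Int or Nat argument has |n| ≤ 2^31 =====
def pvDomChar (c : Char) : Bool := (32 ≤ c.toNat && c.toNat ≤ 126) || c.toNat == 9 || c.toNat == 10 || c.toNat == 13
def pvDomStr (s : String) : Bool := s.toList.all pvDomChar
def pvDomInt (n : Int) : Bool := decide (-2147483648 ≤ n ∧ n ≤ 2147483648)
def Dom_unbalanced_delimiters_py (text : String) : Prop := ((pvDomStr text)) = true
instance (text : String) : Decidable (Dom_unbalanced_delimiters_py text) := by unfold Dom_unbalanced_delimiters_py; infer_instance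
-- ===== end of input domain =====

-- B replaces A's one stateful scan by a pipeline (strip escape pairs, split on quotes, count brackets outside): alternative decomposition, same cost.

-- ===== PORT A =====
-- A's single loop: state p, b, quote, esc carried over every character.
def afold (p b : Int) (q esc : Bool) : List Char → Bool
  | [] => q || decide (p > 0) || decide (b > 0)
  | ch :: t =>
    if esc then afold p b q false t
    else if ch = '\\' then afold p b q true t
    else if ch = '"' then afold p b (!q) esc t
    else if q then afold p b q esc t
    else if ch = '(' then afold (p + 1) b q esc t
    else if ch = ')' then afold (max 0 (p - 1)) b q esc t
    else if ch = '[' then afold p (b + 1) q esc t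
    else if ch = ']' then afold p (max 0 (b - 1)) q esc t
    else afold p b q esc t

def unbalanced_delimiters_py (text : String) : Bool :=
  afold 0 0 false false text.toList

-- ===== PORT B =====
-- pass 1 of Source B: delete backslash-escape pairs (while-loop with i += 2).
def stripEscB : List Char → List Char
  | [] => []
  | ['\\'] => []
  | '\\' :: _ :: t => stripEscB t
  | c :: t => c :: stripEscB t

-- pass 2 of Source B: cleaned.split('"') (never returns []).
def splitQB : List Char → List (List Char)
  | [] => [[]]
  | '"' :: t => [] :: splitQB t
  | c :: t =>
    match splitQB t with
    | [] => [[c]]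
    | s :: rest => (c :: s) :: rest

-- parts[0::2] (even-indexed segments).
mutual
  def evensB : List (List Char) → List (List Char)
    | [] => []
    | a :: l => a :: oddsB l
  def oddsB : List (List Char) → List (List Char)
    | [] => []
    | _ :: l => evensB l
end

-- pass 3 of Source B: floor-at-zero bracket counting.
def bloop (p b : Int) : List Char → Int × Int
  | [] => (p, b)
  | ch :: t =>
    if ch = '(' then bloop (p + 1) b t
    else if ch = ')' then bloop (max 0 (p - 1)) b t
    else if ch = '[' then bloop p (b + 1) t
    else if ch = ']' then bloop p (max 0 (b - 1)) t
    else bloop p b t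

def unbalanced_delimiters_py_alt (text : String) : Bool :=
  let cleaned := stripEscB text.toList
  let parts := splitQB cleaned
  let outside := (evensB parts).flatten
  let r := bloop 0 0 outside
  decide (parts.length % 2 = 0) || decide (r.1 > 0) || decide (r.2 > 0)

-- ===== PRECONDITION & SPEC =====
def Spec_unbalanced_delimiters_py (text : String) (out : Bool) : Prop := out = unbalanced_delimiters_py_alt text
instance (text : String) (out : Bool) : Decidable (Spec_unbalanced_delimiters_py text out) := by unfold Spec_unbalanced_delimiters_py; infer_instance

-- ===== CLAIM (what is proved, stated in full; the proofs are below) =====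
def Claim_equal_unbalanced_delimiters_py : Prop := ∀ (text : String), Dom_unbalanced_delimiters_py text → Spec_unbalanced_delimiters_py text (unbalanced_delimiters_py text)

-- ===== LEMMAS AND PROOFS =====

-- proof-side loop: A's loop after escape pairs are gone (esc is always false).
def noesc (p b : Int) (q : Bool) : List Char → Bool
  | [] => q || decide (p > 0) || decide (b > 0)
  | ch :: t =>
    if ch = '"' then noesc p b (!q) t
    else if q then noesc p b q t
    else if ch = '(' then noesc (p + 1) b q t
    else if ch = ')' then noesc (max 0 (p - 1)) b q t
    else if ch = '[' then noesc p (b + 1) q t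
    else if ch = ']' then noesc p (max 0 (b - 1)) q t
    else noesc p b q t

theorem splitQB_ne_nil (cs : List Char) : splitQB cs ≠ [] := by
  induction cs using splitQB.induct <;> simp [splitQB] <;> split <;> simp

theorem afold_eq_noesc (cs : List Char) :
    ∀ p b q, afold p b q false cs = noesc p b q (stripEscB cs) := by
  induction cs using stripEscB.induct with
  | case1 => intro p b q; simp [afold, noesc, stripEscB]
  | case2 => intro p b q; simp [afold, noesc, stripEscB]
  | case3 c t ih => intro p b q; simpa [afold, stripEscB] using ih p b q
  | case4 c t h1 h2 ih =>
    intro p b q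
    have hc : c ≠ '\\' := by
      intro h; subst h
      cases t with
      | nil => exact h1 rfl rfl
      | cons x xs => exact h2 x xs rfl rfl
    simp only [stripEscB, afold, noesc, if_neg hc]
    split_ifs <;> first | apply ih | simp_all

theorem noesc_eq_split (cs : List Char) :
    ∀ (p b : Int) (q : Bool),
      noesc p b q cs =
        (decide ((splitQB cs).length % 2 = (if q then 1 else 0)) ||
          (let r := bloop p b ((if q then oddsB (splitQB cs) else evensB (splitQB cs)).flatten);
            decide (r.1 > 0) || decide (r.2 > 0))) := by
  induction cs with
  | nil =>
    intro p b q
    cases q <;> simp [noesc, splitQB, evensB, oddsB, bloop]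
  | cons c t ih =>
    intro p b q
    by_cases hq : c = '"'
    · subst hq
      have hpar : ((splitQB ('"' :: t)).length % 2 = (if q then 1 else 0)) ↔
          ((splitQB t).length % 2 = (if (!q) then 1 else 0)) := by
        simp only [splitQB, List.length_cons]
        cases q <;> simp <;> omega
      rw [show noesc p b q ('"' :: t) = noesc p b (!q) t from by simp [noesc]]
      rw [ih p b (!q)]
      congr 1
      · simp only [decide_eq_decide]; exact hpar.symm
      · cases q <;> simp [splitQB, evensB, oddsB]
    · obtain ⟨s, rest, hsp⟩ : ∃ s rest, splitQB t = s :: rest := by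
        cases h : splitQB t with
        | nil => exact absurd h (splitQB_ne_nil t)
        | cons s rest => exact ⟨s, rest, rfl⟩
      have hsc : splitQB (c :: t) = (c :: s) :: rest := by
        cases t with
        | nil =>
          simp [splitQB] at hsp
          obtain ⟨rfl, rfl⟩ := hsp
          simp [splitQB, hq]
        | cons x xs =>
          simp only [splitQB, if_neg hq] at hsp ⊢
          rw [hsp]
      have hlen : (splitQB (c :: t)).length = (splitQB t).length := by
        rw [hsc, hsp]; rfl
      cases q with
      | true =>
        rw [show noesc p b true (c :: t) = noesc p b true t from by simp [noesc, hq]]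
        rw [ih p b true, hlen, hsc, hsp]
        simp [oddsB]
      | false =>
        have hkept : (evensB (splitQB (c :: t))).flatten = c :: (evensB (splitQB t)).flatten := by
          rw [hsc, hsp]; simp [evensB]
        simp only [noesc, if_neg hq]
        split_ifs with h1 h2 h3 h4 <;>
          rw [ih _ _ false, hlen] <;>
          simp only [hkept, bloop, h1] <;>
          simp_all

-- ===== VERDICT (by name: the statement is the Claim_ definition above) =====
theorem unbalanced_delimiters_py_spec : Claim_equal_unbalanced_delimiters_py := by
  intro text _
  unfold Spec_unbalanced_delimiters_py unbalanced_delimiters_py unbalanced_delimiters_py_alt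
  rw [afold_eq_noesc, noesc_eq_split]
  simp [Bool.or_assoc]
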